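-- pv_equiv track=rewrite | github.com/ethan-huo/shot-boundary-zig | scripts/autoshot_quick_check.py | window_source_indices
-- ===== SOURCE A (Python) =====
-- MODEL_CONTEXT_FRAMES = 25
--
-- MODEL_WINDOW_FRAMES = 100
--
-- MODEL_OUTPUT_FRAMES_PER_WINDOW = 50
--
-- def window_source_indices(frame_count: int) -> list[list[int]]:
--     remainder = frame_count % MODEL_OUTPUT_FRAMES_PER_WINDOW
--     padded_start = MODEL_CONTEXT_FRAMES
--     padded_end = MODEL_CONTEXT_FRAMES + MODEL_OUTPUT_FRAMES_PER_WINDOW - (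
--         MODEL_OUTPUT_FRAMES_PER_WINDOW if remainder == 0 else remainder
--     )
--     padded_count = padded_start + frame_count + padded_end
--     windows = []
--     ptr = 0
--     while ptr + MODEL_WINDOW_FRAMES <= padded_count:
--         indices = []
--         for padded_index in range(ptr, ptr + MODEL_WINDOW_FRAMES):
--             if padded_index < padded_start:
--                 indices.append(0)
--             elif padded_index < padded_start + frame_count:
--                 indices.append(padded_index - padded_start)
--             else:
--                 indices.append(frame_count - 1)
--         windows.append(indices)
--         ptr += MODEL_OUTPUT_FRAMES_PER_WINDOW
--     return windows
-- ===== SOURCE B (Python) =====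
-- MODEL_CONTEXT_FRAMES = 25
--
-- MODEL_WINDOW_FRAMES = 100
--
-- MODEL_OUTPUT_FRAMES_PER_WINDOW = 50
--
-- def window_source_indices(frame_count: int) -> list[list[int]]:
--     remainder = frame_count % MODEL_OUTPUT_FRAMES_PER_WINDOW
--     padded_start = MODEL_CONTEXT_FRAMES
--     padded_end = MODEL_CONTEXT_FRAMES + MODEL_OUTPUT_FRAMES_PER_WINDOW - (
--         MODEL_OUTPUT_FRAMES_PER_WINDOW if remainder == 0 else remainder
--     )
--     padded_count = padded_start + frame_count + padded_end
--     padded = [0] * padded_start + list(range(frame_count)) + [frame_count - 1] * padded_end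
--     return [
--         padded[ptr:ptr + MODEL_WINDOW_FRAMES]
--         for ptr in range(0, padded_count - MODEL_WINDOW_FRAMES + 1, MODEL_OUTPUT_FRAMES_PER_WINDOW)
--     ]
-- ===== Notes on version B (the rewrite author's own statement) =====
-- stated objective: faster
-- what changed: B builds the padded index table (zeros prefix, range, clamped suffix) once and emits each window as a slice of it, instead of A's nested while/for loop that re-clamps every index of every window.
import Mathlib
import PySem

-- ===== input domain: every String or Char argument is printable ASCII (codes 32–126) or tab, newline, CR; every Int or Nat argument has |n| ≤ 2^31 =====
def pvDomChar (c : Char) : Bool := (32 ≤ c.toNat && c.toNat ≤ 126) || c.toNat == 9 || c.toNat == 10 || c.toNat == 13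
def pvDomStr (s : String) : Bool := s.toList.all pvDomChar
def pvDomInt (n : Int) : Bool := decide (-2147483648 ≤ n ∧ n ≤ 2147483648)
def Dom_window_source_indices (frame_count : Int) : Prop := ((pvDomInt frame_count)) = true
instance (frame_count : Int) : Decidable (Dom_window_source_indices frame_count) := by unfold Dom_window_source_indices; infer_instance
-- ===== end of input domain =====

-- B replaces A's nested per-element clamping loops by building the padded index
-- table once and slicing it per window (measured constant-factor speedup in Python).

-- ===== PORT A =====
-- inner 'for padded_index in range(ptr, ptr+100)' loop of A
def winA_indices (frame_count padded_start ptr : Int) : List Int :=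
  (PySem.List.pyRange ptr (ptr + 100) 1).foldl
    (fun indices padded_index =>
      if padded_index < padded_start then indices ++ [0]
      else if padded_index < padded_start + frame_count then
        indices ++ [padded_index - padded_start]
      else indices ++ [frame_count - 1]) []

-- outer 'while ptr + 100 <= padded_count' loop of A
def winA_loop (frame_count padded_start padded_count ptr : Int)
    (windows : List (List Int)) : List (List Int) :=
  if _h : ptr + 100 ≤ padded_count then
    winA_loop frame_count padded_start padded_count (ptr + 50)
      (windows ++ [winA_indices frame_count padded_start ptr])
  else windows
termination_by (padded_count - ptr).toNat
decreasing_by omega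

def window_source_indices (frame_count : Int) : List (List Int) :=
  let remainder := PySem.Int.mod frame_count 50
  let padded_start : Int := 25
  let padded_end : Int := 25 + 50 - (if remainder = 0 then 50 else remainder)
  let padded_count := padded_start + frame_count + padded_end
  winA_loop frame_count padded_start padded_count 0 []

-- ===== PORT B =====
def window_source_indices_alt (frame_count : Int) : List (List Int) :=
  let remainder := PySem.Int.mod frame_count 50
  let padded_start : Int := 25
  let padded_end : Int := 25 + 50 - (if remainder = 0 then 50 else remainder)
  let padded_count := padded_start + frame_count + padded_end
  let padded : List Int :=
    List.replicate padded_start.toNat 0 ++ PySem.List.pyRange 0 frame_count 1 ++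
      List.replicate padded_end.toNat (frame_count - 1)
  (PySem.List.pyRange 0 (padded_count - 100 + 1) 50).map
    (fun ptr => PySem.List.slice padded (some ptr) (some (ptr + 100)))

-- ===== PRECONDITION & SPEC =====
def Spec_window_source_indices (frame_count : Int) (out : List (List Int)) : Prop := out = window_source_indices_alt frame_count
instance (frame_count : Int) (out : List (List Int)) : Decidable (Spec_window_source_indices frame_count out) := by unfold Spec_window_source_indices; infer_instance

-- ===== CLAIM (what is proved, stated in full; the proofs are below) =====
def Claim_equal_window_source_indices : Prop := ∀ (frame_count : Int), Dom_window_source_indices frame_count → Spec_window_source_indices frame_count (window_source_indices frame_count)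

-- ===== LEMMAS AND PROOFS =====

-- step-50 range: nil and cons unfoldings
lemma pyRange50_nil (a b : Int) (h : b ≤ a) : PySem.List.pyRange a b 50 = [] := by
  rw [PySem.List.pyRange_of_pos _ _ (by norm_num)]
  simp [show ¬ a < b by omega]

lemma pyRange50_cons (a b : Int) (h : a < b) :
    PySem.List.pyRange a b 50 = a :: PySem.List.pyRange (a + 50) b 50 := by
  rw [PySem.List.pyRange_of_pos _ _ (by norm_num : (0:Int) < 50),
      PySem.List.pyRange_of_pos _ _ (by norm_num : (0:Int) < 50)]
  by_cases h2 : a + 50 < b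
  · have hn : ((b - a + 50 - 1) / 50).toNat = ((b - (a + 50) + 50 - 1) / 50).toNat + 1 := by
      omega
    simp only [if_pos h, if_pos h2, hn, List.range_succ_eq_map, List.map_cons, List.map_map]
    refine congrArg₂ List.cons (by norm_num) (List.map_congr_left ?_)
    intro k _
    simp only [Function.comp_apply, Nat.succ_eq_add_one]
    push_cast
    ring
  · have hn : ((b - a + 50 - 1) / 50).toNat = 1 := by omega
    simp [if_pos h, if_neg h2, hn]

-- fold that appends one element per iteration is init ++ map
lemma foldl_append_map {α β : Type} (f : α → β) (l : List α) (init : List β) :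
    l.foldl (fun acc x => acc ++ [f x]) init = init ++ l.map f := by
  induction l generalizing init with
  | nil => simp
  | cons x xs ih => simp [List.foldl_cons, ih]

-- A's inner loop is a map of the clamping function over range(ptr, ptr+100)
lemma winA_indices_eq_map (frame_count ptr : Int) :
    winA_indices frame_count 25 ptr =
      (PySem.List.pyRange ptr (ptr + 100) 1).map
        (fun i => if i < 25 then 0 else if i < 25 + frame_count then i - 25 else frame_count - 1) := by
  unfold winA_indices
  rw [show (fun (indices : List Int) (padded_index : Int) =>
      if padded_index < 25 then indices ++ [0]
      else if padded_index < 25 + frame_count then indices ++ [padded_index - 25]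
      else indices ++ [frame_count - 1]) =
      (fun (indices : List Int) (i : Int) =>
        indices ++ [if i < 25 then 0 else if i < 25 + frame_count then i - 25 else frame_count - 1])
    from by funext indices i; split_ifs <;> rfl]
  rw [foldl_append_map]
  simp

-- the padded table's entries are exactly the clamped indices (for 1 ≤ frame_count)
lemma padded_getElem (frame_count pe : Int) (hfc : 1 ≤ frame_count) (m : Nat)
    (hm : m < (List.replicate 25 (0:Int) ++ PySem.List.pyRange 0 frame_count 1 ++
        List.replicate pe.toNat (frame_count - 1)).length) :
    (List.replicate 25 (0:Int) ++ PySem.List.pyRange 0 frame_count 1 ++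
        List.replicate pe.toNat (frame_count - 1))[m] =
      if (m:Int) < 25 then 0 else if (m:Int) < 25 + frame_count then (m:Int) - 25 else frame_count - 1 := by
  simp only [List.length_append, List.length_replicate, PySem.List.length_pyRange_one] at hm
  by_cases h1 : m < 25
  · rw [List.getElem_append_left (by
        simp only [List.length_append, List.length_replicate, PySem.List.length_pyRange_one]
        omega),
      List.getElem_append_left (by simp only [List.length_replicate]; omega),
      List.getElem_replicate]
    rw [if_pos (by omega)]
  · by_cases h2 : (m:Int) < 25 + frame_count
    · rw [List.getElem_append_left (by
          simp only [List.length_append, List.length_replicate, PySem.List.length_pyRange_one]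
          omega),
        List.getElem_append_right (by simp only [List.length_replicate]; omega),
        PySem.List.getElem_pyRange_one _ _ _ (by
          simp only [List.length_replicate, PySem.List.length_pyRange_one]
          omega)]
      rw [if_neg (by omega), if_pos h2]
      simp only [List.length_replicate]
      omega
    · rw [List.getElem_append_right (by
          simp only [List.length_append, List.length_replicate, PySem.List.length_pyRange_one]
          omega),
        List.getElem_replicate]
      rw [if_neg (by omega), if_neg h2]

-- A's window equals B's slice of the padded table, for in-range window starts
lemma window_eq_slice (frame_count : Int)
    (P : List Int)
    (hget : ∀ (m : Nat) (hm : m < P.length),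
      P[m] = if (m:Int) < 25 then 0 else if (m:Int) < 25 + frame_count then (m:Int) - 25 else frame_count - 1)
    (ptr : Int) (hp0 : 0 ≤ ptr) (hp1 : ptr.toNat + 100 ≤ P.length) :
    winA_indices frame_count 25 ptr = PySem.List.slice P (some ptr) (some (ptr + 100)) := by
  rw [winA_indices_eq_map]
  obtain ⟨j, rfl⟩ : ∃ j : Nat, (j:Int) = ptr := ⟨ptr.toNat, by omega⟩
  rw [show ((j:Int) + 100) = ((j:Int) + ((100:Nat):Int)) by norm_num,
      PySem.List.slice_natCast_add]
  apply List.ext_getElem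
  · simp only [List.length_map, PySem.List.length_pyRange_one, List.length_take,
      List.length_drop]
    omega
  · intro k hk1 hk2
    have hkl : k < 100 := by
      simp only [List.length_map, PySem.List.length_pyRange_one] at hk1
      omega
    rw [List.getElem_map, PySem.List.getElem_pyRange_one, List.getElem_take, List.getElem_drop,
      hget (j + k) (by simp only [Int.toNat_natCast] at hp1; omega)]
    push_cast
    split_ifs <;> omega

-- A's while loop produces exactly the slices at range(ptr, pc-100+1, 50)
lemma loop_eq (frame_count pc : Int) (P : List Int)
    (hwin : ∀ ptr : Int, 0 ≤ ptr → ptr + 100 ≤ pc →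
      winA_indices frame_count 25 ptr = PySem.List.slice P (some ptr) (some (ptr + 100)))
    (ptr : Int) (acc : List (List Int)) (hp : 0 ≤ ptr) :
    winA_loop frame_count 25 pc ptr acc =
      acc ++ (PySem.List.pyRange ptr (pc - 100 + 1) 50).map
        (fun p => PySem.List.slice P (some p) (some (p + 100))) := by
  rw [winA_loop]
  by_cases h : ptr + 100 ≤ pc
  · rw [dif_pos h, loop_eq frame_count pc P hwin (ptr + 50) _ (by omega)]
    rw [pyRange50_cons ptr (pc - 100 + 1) (by omega)]
    rw [hwin ptr hp h]
    simp
  · rw [dif_neg h, pyRange50_nil _ _ (by omega)]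
    simp
termination_by (pc - ptr).toNat
decreasing_by omega

-- ===== VERDICT (by name: the statement is the Claim_ definition above) =====
theorem window_source_indices_spec : Claim_equal_window_source_indices := by
  intro fc _
  unfold Spec_window_source_indices window_source_indices window_source_indices_alt
  have h25 : ((25:Int)).toNat = 25 := rfl
  simp only [h25]
  set r := PySem.Int.mod fc 50 with hr
  have hr0 : 0 ≤ r := Int.fmod_nonneg_of_pos fc (by norm_num)
  have hr1 : r < 50 := Int.fmod_lt_of_pos fc (by norm_num)
  have hdvd : (50:Int) ∣ fc - r := by
    refine ⟨fc.fdiv 50, ?_⟩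
    have := Int.mul_fdiv_add_fmod fc 50
    simp only [hr, PySem.Int.mod]
    omega
  set pe : Int := 25 + 50 - (if r = 0 then 50 else r) with hpe
  have hpe0 : 25 ≤ pe := by by_cases h0 : r = 0 <;> simp [hpe, h0] <;> omega
  set pc : Int := 25 + fc + pe with hpc
  set P : List Int := List.replicate 25 (0:Int) ++ PySem.List.pyRange 0 fc 1 ++
    List.replicate pe.toNat (fc - 1) with hP
  by_cases hfc : fc ≤ 0
  · -- no full window fits: both sides are empty
    have hpcle : pc ≤ 50 := by
      rcases hdvd with ⟨q, hq⟩
      by_cases h0 : r = 0 <;> simp only [hpc, hpe, h0, if_pos] <;> omega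
    rw [winA_loop, dif_neg (by omega), pyRange50_nil _ _ (by omega)]
    simp
  · -- fc ≥ 1: the padded table has length pc and realizes A's clamping
    have hlen : P.length = pc.toNat := by
      simp only [hP, List.length_append, List.length_replicate, PySem.List.length_pyRange_one]
      omega
    have hget := padded_getElem fc pe (by omega)
    rw [loop_eq fc pc P ?_ 0 [] le_rfl]
    · simp only [List.nil_append]
    · intro ptr h0 h100
      exact window_eq_slice fc P (fun m hm => hget m (hm)) ptr h0 (by omega)
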